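-- pv_equiv track=rewrite | github.com/cedricwangyu/LC | 468-Validate_IP_Address.py | validIP6
-- ===== SOURCE A (Python) =====
-- def validIP6(IP):
--     IP6 = IP.split(':')
--     if (len(IP6) == 8) and (all([len(item) >= 1 for item in IP6])) and (all([len(item) <= 4 for item in IP6])):
--         A = ['a','b','c','d','e','f','0','1','2','3','4','5','6','7','8','9']
--         for item in list("".join(IP6).lower()):
--             if item not in A:
--                 return False
--         return True
--
--     return False
-- ===== SOURCE B (Python) =====
-- def validIP6(IP):
--     groups = 1
--     digits = 0
--     for ch in IP:
--         if ch == ':':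
--             if digits < 1 or digits > 4:
--                 return False
--             groups += 1
--             digits = 0
--         elif ch in "0123456789abcdefABCDEF":
--             digits += 1
--         else:
--             return False
--     return groups == 8 and 1 <= digits <= 4
-- ===== Notes on version B (the rewrite author's own statement) =====
-- stated objective: simpler
-- what changed: Replaces A's split-into-groups, per-group length checks and a second scan over the lowercased join with a single left-to-right pass over the string that maintains (groups, digits) counters and rejects early.
import Mathlib
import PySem

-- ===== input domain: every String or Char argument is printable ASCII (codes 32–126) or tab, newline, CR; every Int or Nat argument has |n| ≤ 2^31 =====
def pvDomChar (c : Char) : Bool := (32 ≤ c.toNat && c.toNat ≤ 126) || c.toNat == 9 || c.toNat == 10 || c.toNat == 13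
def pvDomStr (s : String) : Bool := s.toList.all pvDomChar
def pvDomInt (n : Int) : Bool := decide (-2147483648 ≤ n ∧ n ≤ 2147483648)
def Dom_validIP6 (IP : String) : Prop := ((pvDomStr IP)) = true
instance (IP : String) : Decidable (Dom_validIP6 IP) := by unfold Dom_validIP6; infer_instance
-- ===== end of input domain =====

-- B replaces A's split/length-checks/join-lower scan with one left-to-right pass keeping
-- (groups, digits) counters (objective: simpler single pass, no intermediate lists).

-- ===== PORT A =====
-- the list A = ['a','b','c','d','e','f','0','1','2','3','4','5','6','7','8','9']
def hexLowerAlphabet : List Char := ['a','b','c','d','e','f','0','1','2','3','4','5','6','7','8','9']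

-- "for item in list("".join(IP6).lower()): if item not in A: return False / return True"
def aHexLoop : List Char → Bool
  | [] => true
  | c :: rest => if c ∉ hexLowerAlphabet then false else aHexLoop rest

-- works on IP.toList via PySem.Chars (exact: Python str.split(':'), ''.join, .lower, len)
def validIP6 (IP : String) : Bool :=
  let IP6 := PySem.Chars.splitOn IP.toList [':']
  if (IP6.length == 8) && IP6.all (fun item => decide (1 ≤ item.length))
      && IP6.all (fun item => decide (item.length ≤ 4)) then
    aHexLoop (PySem.Chars.lower (PySem.Chars.join [] IP6))
  else
    false

-- ===== PORT B =====
-- the characters of "0123456789abcdefABCDEF"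
def hexDigitsBothCases : List Char :=
  ['0','1','2','3','4','5','6','7','8','9','a','b','c','d','e','f','A','B','C','D','E','F']

-- the for-loop of Source B carrying (groups, digits); early returns become false
def altGo : List Char → Int → Int → Bool
  | [], groups, digits => groups == 8 && (decide (1 ≤ digits) && decide (digits ≤ 4))
  | ch :: rest, groups, digits =>
    if ch = ':' then
      if digits < 1 || digits > 4 then false
      else altGo rest (groups + 1) 0
    else if ch ∈ hexDigitsBothCases then
      altGo rest groups (digits + 1)
    else
      false

def validIP6_alt (IP : String) : Bool := altGo IP.toList 1 0

-- ===== PRECONDITION & SPEC =====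
def Spec_validIP6 (IP : String) (out : Bool) : Prop := out = validIP6_alt IP
instance (IP : String) (out : Bool) : Decidable (Spec_validIP6 IP out) := by unfold Spec_validIP6; infer_instance

-- ===== CLAIM (what is proved, stated in full; the proofs are below) =====
def Claim_equal_validIP6 : Prop := ∀ (IP : String), Dom_validIP6 IP → Spec_validIP6 IP (validIP6 IP)

-- ===== LEMMAS AND PROOFS =====

-- structural characterisation of Python's str.split(':')
def splitColon : List Char → List (List Char)
  | [] => [[]]
  | c :: rest => if c = ':' then [] :: splitColon rest else (splitColon rest).modifyHead (c :: ·)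

theorem splitColon_ne_nil (cs : List Char) : ∃ p ps, splitColon cs = p :: ps := by
  induction cs with
  | nil => exact ⟨[], [], rfl⟩
  | cons c rest ih =>
    obtain ⟨p, ps, hps⟩ := ih
    by_cases hc : c = ':'
    · exact ⟨[], splitColon rest, by simp [splitColon, hc]⟩
    · exact ⟨c :: p, ps, by simp [splitColon, hc, hps]⟩

theorem modifyHead_id' (l : List (List Char)) : List.modifyHead (fun x => x) l = l := by
  cases l <;> simp

theorem go_eq (fuel : Nat) (l cur : List Char) (acc : List (List Char)) (h : l.length ≤ fuel) :
    PySem.Chars.splitOn.go [':'] fuel l cur acc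
      = acc.reverse ++ (splitColon l).modifyHead (cur.reverse ++ ·) := by
  induction fuel generalizing l cur acc with
  | zero =>
    match l, h with
    | [], _ => simp [PySem.Chars.splitOn.go, splitColon]
  | succ n ih =>
    match l with
    | [] => simp [PySem.Chars.splitOn.go, splitColon]
    | c :: rest =>
      rw [PySem.Chars.splitOn.go]
      by_cases hc : c = ':'
      · subst hc
        have hp : [':'].isPrefixOf (':' :: rest) = true := by simp [List.isPrefixOf]
        rw [if_pos hp]
        rw [ih _ _ _ (by simpa using Nat.le_of_succ_le_succ (by simpa using h))]
        simp [splitColon, modifyHead_id']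
      · have hp : [':'].isPrefixOf (c :: rest) = false := by
          simp [List.isPrefixOf]; exact fun hh => (hc hh.symm).elim
        rw [if_neg (by simp [hp])]
        rw [ih rest (c :: cur) acc (by simpa using Nat.le_of_succ_le_succ (by simpa using h))]
        obtain ⟨p, ps, hps⟩ := splitColon_ne_nil rest
        simp [splitColon, hc, hps]

theorem splitOn_colon (cs : List Char) : PySem.Chars.splitOn cs [':'] = splitColon cs := by
  unfold PySem.Chars.splitOn
  rw [go_eq _ _ _ _ (by omega)]
  simp [modifyHead_id']

theorem char_eq_iff (a b : Char) : a = b ↔ a.toNat = b.toNat :=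
  ⟨fun h => h ▸ rfl, fun h => Char.ext (UInt32.toNat_inj.mp h)⟩

-- per-character bridge: membership in B's two-case alphabet = A's lowercase test
theorem mem_hex (c : Char) : (c ∈ hexDigitsBothCases) ↔ (PySem.Chars.lowerChar c ∈ hexLowerAlphabet) := by
  simp only [hexDigitsBothCases, hexLowerAlphabet, List.mem_cons, List.not_mem_nil, or_false,
    PySem.Chars.lowerChar, PySem.Chars.isupper]
  split_ifs with h
  · simp only [Bool.and_eq_true, decide_eq_true_eq, Char.le_def, UInt32.le_iff_toNat_le] at h
    have h1 : 65 ≤ c.toNat := h.1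
    have h2 : c.toNat ≤ 90 := h.2
    have hv : (Char.ofNat (c.toNat + 32)).toNat = c.toNat + 32 := by
      rw [Char.toNat_ofNat, if_pos (Or.inl (by omega))]
    simp only [char_eq_iff, hv, show ('0':Char).toNat = 48 from rfl, show ('1':Char).toNat = 49 from rfl, show ('2':Char).toNat = 50 from rfl, show ('3':Char).toNat = 51 from rfl, show ('4':Char).toNat = 52 from rfl, show ('5':Char).toNat = 53 from rfl, show ('6':Char).toNat = 54 from rfl, show ('7':Char).toNat = 55 from rfl, show ('8':Char).toNat = 56 from rfl, show ('9':Char).toNat = 57 from rfl, show ('a':Char).toNat = 97 from rfl, show ('b':Char).toNat = 98 from rfl, show ('c':Char).toNat = 99 from rfl, show ('d':Char).toNat = 100 from rfl, show ('e':Char).toNat = 101 from rfl, show ('f':Char).toNat = 102 from rfl, show ('A':Char).toNat = 65 from rfl, show ('B':Char).toNat = 66 from rfl, show ('C':Char).toNat = 67 from rfl, show ('D':Char).toNat = 68 from rfl, show ('E':Char).toNat = 69 from rfl, show ('F':Char).toNat = 70 from rfl]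
    omega
  · simp only [Bool.and_eq_true, decide_eq_true_eq, Char.le_def, UInt32.le_iff_toNat_le, not_and, not_le] at h
    simp only [char_eq_iff, show ('0':Char).toNat = 48 from rfl, show ('1':Char).toNat = 49 from rfl, show ('2':Char).toNat = 50 from rfl, show ('3':Char).toNat = 51 from rfl, show ('4':Char).toNat = 52 from rfl, show ('5':Char).toNat = 53 from rfl, show ('6':Char).toNat = 54 from rfl, show ('7':Char).toNat = 55 from rfl, show ('8':Char).toNat = 56 from rfl, show ('9':Char).toNat = 57 from rfl, show ('a':Char).toNat = 97 from rfl, show ('b':Char).toNat = 98 from rfl, show ('c':Char).toNat = 99 from rfl, show ('d':Char).toNat = 100 from rfl, show ('e':Char).toNat = 101 from rfl, show ('f':Char).toNat = 102 from rfl, show ('A':Char).toNat = 65 from rfl, show ('B':Char).toNat = 66 from rfl, show ('C':Char).toNat = 67 from rfl, show ('D':Char).toNat = 68 from rfl, show ('E':Char).toNat = 69 from rfl, show ('F':Char).toNat = 70 from rfl]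
    by_cases h1 : 65 ≤ c.toNat
    · have h2 : 90 < c.toNat := h h1
      omega
    · omega

theorem aHexLoop_eq_all (l : List Char) : aHexLoop l = l.all (· ∈ hexLowerAlphabet) := by
  induction l with
  | nil => rfl
  | cons c rest ih =>
    by_cases hc : c ∈ hexLowerAlphabet <;> simp [aHexLoop, hc, ih]

theorem join_nil_cons (p : List Char) (ps : List (List Char)) :
    PySem.Chars.join [] (p :: ps) = p ++ PySem.Chars.join [] ps := by
  cases ps with
  | nil => simp [PySem.Chars.join, List.intercalate]
  | cons q qs => simp [PySem.Chars.join, List.intercalate, List.intersperse]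

theorem hex_join (P : List (List Char)) :
    aHexLoop (PySem.Chars.lower (PySem.Chars.join [] P))
      = P.all (fun p => p.all (· ∈ hexDigitsBothCases)) := by
  induction P with
  | nil => rfl
  | cons p ps ih =>
    rw [join_nil_cons]
    simp only [PySem.Chars.lower, List.map_append, aHexLoop_eq_all, List.all_append,
      List.all_cons] at *
    rw [ih]
    congr 1
    simp only [List.all_map]
    congr 1
    funext c
    exact decide_eq_decide.mpr (mem_hex c).symm

def goodTail (ps : List (List Char)) : Bool :=
  ps.all (fun q => decide (1 ≤ q.length) && decide (q.length ≤ 4) && q.all (· ∈ hexDigitsBothCases))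

-- loop invariant of B: altGo against the split of the remaining input
theorem altGo_eq (cs : List Char) : ∀ (g d : Int),
    altGo cs g d =
      match splitColon cs with
      | [] => false
      | p :: ps =>
        decide (g + (ps.length : Int) = 8) && decide (1 ≤ d + (p.length : Int))
          && decide (d + (p.length : Int) ≤ 4) && p.all (· ∈ hexDigitsBothCases) && goodTail ps := by
  induction cs with
  | nil =>
    intro g d
    simp only [splitColon, altGo, goodTail, List.all_nil, List.length_nil]
    rw [Bool.eq_iff_iff]
    simp
    omega
  | cons c rest ih =>
    intro g d
    obtain ⟨p, ps, hps⟩ := splitColon_ne_nil rest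
    by_cases hc : c = ':'
    · subst hc
      rw [show splitColon (':' :: rest) = [] :: p :: ps from by simp [splitColon, hps]]
      rw [show altGo (':' :: rest) g d
            = if (decide (d < 1) || decide (d > 4)) = true then false else altGo rest (g + 1) 0
          from by simp [altGo]]
      by_cases hd : d < 1 ∨ d > 4
      · rw [if_pos (by simp only [Bool.or_eq_true, decide_eq_true_eq]; exact hd)]
        rw [Bool.eq_iff_iff]
        simp only [List.length_nil, Nat.cast_zero, add_zero, Bool.and_eq_true, decide_eq_true_eq,
          Bool.false_eq_true, false_iff]
        rintro ⟨⟨⟨⟨-, h2⟩, h3⟩, -⟩, -⟩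
        omega
      · rw [if_neg (by simp only [Bool.or_eq_true, decide_eq_true_eq]; exact hd)]
        rw [not_or] at hd
        have hd1 : 1 ≤ d := by omega
        have hd2 : d ≤ 4 := by omega
        rw [ih (g + 1) 0, hps, Bool.eq_iff_iff]
        simp only [goodTail, List.all_cons, List.all_nil, List.length_cons, List.length_nil,
          Nat.cast_zero, add_zero, zero_add, Bool.and_eq_true, decide_eq_true_eq]
        push_cast
        constructor
        · rintro ⟨⟨⟨⟨h1, h2⟩, h3⟩, h4⟩, h5⟩
          exact ⟨⟨⟨⟨by omega, hd1⟩, hd2⟩, trivial⟩, ⟨⟨by omega, by omega⟩, h4⟩, h5⟩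
        · rintro ⟨⟨⟨⟨h1, -⟩, -⟩, -⟩, ⟨⟨h2, h3⟩, h4⟩, h5⟩
          exact ⟨⟨⟨⟨by omega, by omega⟩, by omega⟩, h4⟩, h5⟩
    · simp only [altGo, if_neg hc, splitColon, hps, List.modifyHead_cons]
      by_cases hmem : c ∈ hexDigitsBothCases
      · rw [if_pos hmem, ih g (d + 1), hps]
        rw [Bool.eq_iff_iff]
        simp only [Bool.and_eq_true, decide_eq_true_eq, List.all_cons, List.length_cons, hmem,
          decide_true, Bool.true_and]
        push_cast
        constructor <;> rintro ⟨⟨⟨⟨h1, h2⟩, h3⟩, h4⟩, h5⟩ <;>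
          exact ⟨⟨⟨⟨h1, by omega⟩, by omega⟩, h4⟩, h5⟩
      · rw [if_neg hmem]
        rw [Bool.eq_iff_iff]
        simp only [Bool.false_eq_true, false_iff, Bool.and_eq_true, decide_eq_true_eq,
          List.all_cons, hmem, decide_false]
        rintro ⟨⟨-, h4⟩, -⟩
        simp at h4

-- ===== VERDICT (by name: the statement is the Claim_ definition above) =====
theorem validIP6_spec : Claim_equal_validIP6 := by
  intro IP _
  unfold Spec_validIP6 validIP6 validIP6_alt
  rw [altGo_eq]
  obtain ⟨p, ps, hps⟩ := splitColon_ne_nil IP.toList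
  simp only [splitOn_colon, hps]
  rw [hex_join, Bool.eq_iff_iff]
  constructor
  · intro hA
    have hc : (((p :: ps).length == 8 && (p :: ps).all fun item => decide (1 ≤ item.length))
        && (p :: ps).all fun item => decide (item.length ≤ 4)) = true := by
      by_contra hcn
      rw [if_neg hcn] at hA
      exact absurd hA (by simp)
    rw [if_pos hc] at hA
    simp only [Bool.and_eq_true, beq_iff_eq, List.length_cons, List.all_cons,
      decide_eq_true_eq, List.all_eq_true] at hc hA
    obtain ⟨⟨h8, h1p, h1s⟩, h4p, h4s⟩ := hc
    obtain ⟨hphex, hthex⟩ := hA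
    simp only [goodTail, Bool.and_eq_true, decide_eq_true_eq, List.all_eq_true, zero_add]
    exact ⟨⟨⟨⟨by push_cast at *; omega, by omega⟩, by omega⟩, hphex⟩,
      fun q hq => ⟨⟨by simpa using h1s q hq, by simpa using h4s q hq⟩, hthex q hq⟩⟩
  · intro hB
    simp only [goodTail, Bool.and_eq_true, decide_eq_true_eq, List.all_eq_true, zero_add] at hB
    obtain ⟨⟨⟨⟨h8, h1p⟩, h4p⟩, hphex⟩, htail⟩ := hB
    have hc : (((p :: ps).length == 8 && (p :: ps).all fun item => decide (1 ≤ item.length))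
        && (p :: ps).all fun item => decide (item.length ≤ 4)) = true := by
      simp only [Bool.and_eq_true, beq_iff_eq, List.length_cons, List.all_cons,
        decide_eq_true_eq, List.all_eq_true]
      exact ⟨⟨by push_cast at *; omega, by omega, fun q hq => by simpa using (htail q hq).1.1⟩,
        by omega, fun q hq => by simpa using (htail q hq).1.2⟩
    rw [if_pos hc]
    simp only [List.all_cons, Bool.and_eq_true, List.all_eq_true, decide_eq_true_eq]
    exact ⟨hphex, fun q hq => (htail q hq).2⟩
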